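-- pv_equiv track=rewrite | github.com/benjaminverbeek/Project-Statistical-ML | classificationLDA.py | allCombos
-- ===== SOURCE A (Python) =====
-- def allCombos(lst):
--     """Takes in a list of lists and returns a list of all combinations of list elements."""
--     combos = []
--     for i in range(2**len(lst)):
--         a=i
--         params = []
--         for j in range(len(lst)):
--             if a%2 == 1:
--                 params += lst[j]
--             a = a//2
--         combos.append(params)
--     return combos
-- ===== SOURCE B (Python) =====
-- def allCombos(lst):
--     """Takes in a list of lists and returns a list of all combinations of list elements."""
--     result = [[]]
--     for e in lst:
--         result = result + [r + e for r in result]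
--     return result
-- ===== Notes on version B (the rewrite author's own statement) =====
-- stated objective: simpler
-- what changed: Replaces the binary-counting double loop (decoding each index's bits to pick sublists) with incremental powerset doubling: start from the list containing only the empty combination and, for each sublist, append all current results extended by it.
import Mathlib
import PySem

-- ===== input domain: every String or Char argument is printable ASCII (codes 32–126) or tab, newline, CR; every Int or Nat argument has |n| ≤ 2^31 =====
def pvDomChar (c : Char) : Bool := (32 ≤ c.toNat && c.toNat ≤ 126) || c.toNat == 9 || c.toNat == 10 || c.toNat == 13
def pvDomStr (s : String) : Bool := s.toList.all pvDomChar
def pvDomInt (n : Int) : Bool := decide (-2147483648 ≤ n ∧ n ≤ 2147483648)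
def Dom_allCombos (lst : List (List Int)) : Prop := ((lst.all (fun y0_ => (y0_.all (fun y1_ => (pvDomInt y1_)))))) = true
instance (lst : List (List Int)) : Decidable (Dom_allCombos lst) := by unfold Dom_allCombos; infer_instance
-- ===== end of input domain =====

-- B builds the powerset by incremental doubling instead of A's per-index bit decoding; same values in the same order, simpler.

-- ===== PORT A =====
-- literal port of A: outer loop over range(2**len(lst)); inner loop decodes the bits of i to pick sublists
def allCombos (lst : List (List Int)) : List (List Int) :=
  (PySem.List.pyRange 0 ((2:Int) ^ lst.length) 1).foldl
    (fun combos i =>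
      let st :=
        (PySem.List.pyRange 0 (lst.length : Int) 1).foldl
          (fun (st : Int × List Int) j =>
            let params := if PySem.Int.mod st.1 2 == 1
                          then st.2 ++ PySem.List.pyGetD lst j []
                          else st.2
            (PySem.Int.floordiv st.1 2, params))
          (i, [])
      combos ++ [st.2])
    []

-- ===== PORT B =====
-- literal port of Source B: result = [[]]; for e in lst: result = result + [r + e for r in result]
def allCombos_alt (lst : List (List Int)) : List (List Int) :=
  lst.foldl (fun result e => result ++ result.map (fun r => r ++ e)) [[]]

-- ===== PRECONDITION & SPEC =====
def Spec_allCombos (lst : List (List Int)) (out : List (List Int)) : Prop := out = allCombos_alt lst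
instance (lst : List (List Int)) (out : List (List Int)) : Decidable (Spec_allCombos lst out) := by unfold Spec_allCombos; infer_instance

-- ===== CLAIM (what is proved, stated in full; the proofs are below) =====
def Claim_equal_allCombos : Prop := ∀ (lst : List (List Int)), Dom_allCombos lst → Spec_allCombos lst (allCombos lst)

-- ===== LEMMAS AND PROOFS =====

-- the value A's inner loop accumulates for outer index i (bit j of i selects lst[j]; lst[0] is least significant)
def pvCombo : Nat → List (List Int) → List Int
  | _, [] => []
  | i, e :: t => (if i % 2 = 1 then e else []) ++ pvCombo (i / 2) t

-- A's inner fold over lst computes pvCombo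
theorem pvInner (lst : List (List Int)) (i : Nat) (p : List Int) :
    (lst.foldl
      (fun (st : Int × List Int) e =>
        let params := if PySem.Int.mod st.1 2 == 1 then st.2 ++ e else st.2
        (PySem.Int.floordiv st.1 2, params))
      ((i : Int), p)).2 = p ++ pvCombo i lst := by
  induction lst generalizing i p with
  | nil => simp [pvCombo]
  | cons e t ih =>
    simp only [List.foldl_cons, pvCombo]
    rw [show PySem.Int.mod (i : Int) 2 = ((i % 2 : Nat) : Int) from by exact_mod_cast PySem.Int.mod_natCast i 2,
        show PySem.Int.floordiv (i : Int) 2 = ((i / 2 : Nat) : Int) from by exact_mod_cast PySem.Int.floordiv_natCast i 2]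
    by_cases h : i % 2 = 1
    · have hc : ((((i % 2 : Nat)) : Int) == 1) = true := by simp [h]
      simp only [hc, if_true]
      rw [ih (i / 2) (p ++ e), h, List.append_assoc]
      simp
    · have h0 : i % 2 = 0 := by omega
      have hc : ((((i % 2 : Nat)) : Int) == 1) = false := by simp [h0]
      simp only [hc, Bool.false_eq_true, if_false]
      rw [ih (i / 2) p, h0]
      simp

-- A is the map of pvCombo over range(2^n)
theorem pvA_eq (lst : List (List Int)) :
    allCombos lst = (List.range (2 ^ lst.length)).map (fun i => pvCombo i lst) := by
  unfold allCombos
  rw [show ((2:Int) ^ lst.length) = ((2 ^ lst.length : Nat) : Int) from by push_cast; ring]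
  rw [PySem.List.pyRange_zero_nat (2 ^ lst.length), List.foldl_map]
  have key : ∀ (acc : List (List Int)) (k : Nat), acc ++
      [((PySem.List.pyRange 0 (lst.length : Int) 1).foldl
          (fun (st : Int × List Int) j =>
            let params := if PySem.Int.mod st.1 2 == 1
                          then st.2 ++ PySem.List.pyGetD lst j []
                          else st.2
            (PySem.Int.floordiv st.1 2, params))
          ((k : Int), [])).2] = acc ++ [pvCombo k lst] := by
    intro acc k
    rw [show (lst.length : Int) = PySem.List.len lst from (PySem.List.len_eq lst).symm]
    rw [PySem.List.foldl_pyRange_zero_pyGetD lst []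
      (fun (st : Int × List Int) e =>
        let params := if PySem.Int.mod st.1 2 == 1 then st.2 ++ e else st.2
        (PySem.Int.floordiv st.1 2, params)) ((k : Int), [])]
    rw [pvInner lst k []]
    simp
  calc List.foldl _ [] (List.range (2 ^ lst.length)) =
      List.foldl (fun acc k => acc ++ [pvCombo k lst]) [] (List.range (2 ^ lst.length)) := by
        apply PySem.List.foldl_congr_mem
        intro acc b _
        exact key acc b
    _ = _ := by rw [PySem.List.foldl_append_singleton_eq_map]; simp

-- range(2*m) splits into consecutive pairs (2k, 2k+1)
theorem pvRangeDouble (m : Nat) (f : Nat → List Int) :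
    (List.range (2 * m)).map f = (List.range m).flatMap (fun k => [f (2 * k), f (2 * k + 1)]) := by
  induction m with
  | zero => simp
  | succ m ih =>
    have h : 2 * (m + 1) = (2 * m + 1) + 1 := by ring
    rw [h, List.range_succ, List.range_succ, List.range_succ]
    simp [ih, List.flatMap_append]

-- recursion of the A-side characterisation
theorem pvSpecA_cons (e : List Int) (t : List (List Int)) :
    (List.range (2 ^ (e :: t).length)).map (fun i => pvCombo i (e :: t)) =
    ((List.range (2 ^ t.length)).map (fun i => pvCombo i t)).flatMap (fun s => [s, e ++ s]) := by
  have h : 2 ^ (e :: t).length = 2 * 2 ^ t.length := by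
    rw [List.length_cons, pow_succ]; ring
  rw [h, pvRangeDouble]
  rw [List.flatMap_def, List.flatMap_def, List.map_map]
  congr 1
  apply List.map_congr_left
  intro k _
  have h0 : pvCombo (2 * k) (e :: t) = pvCombo k t := by
    have hm : (2 * k) % 2 = 0 := by omega
    have hd : (2 * k) / 2 = k := by omega
    simp [pvCombo, hm, hd]
  have h1 : pvCombo (2 * k + 1) (e :: t) = e ++ pvCombo k t := by
    have hm : (2 * k + 1) % 2 = 1 := by omega
    have hd : (2 * k + 1) / 2 = k := by omega
    simp [pvCombo, hm, hd]
  simp [h0, h1]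

-- B's doubling fold from an arbitrary accumulator
theorem pvMix (L : List (List Int)) (R : List (List Int)) :
    L.foldl (fun result e => result ++ result.map (fun r => r ++ e)) R =
    (allCombos_alt L).flatMap (fun s => R.map (fun r => r ++ s)) := by
  induction L generalizing R with
  | nil => simp [allCombos_alt]
  | cons e t ih =>
    show t.foldl _ (R ++ R.map (fun r => r ++ e)) = _
    rw [ih]
    have hB : allCombos_alt (e :: t) =
        (allCombos_alt t).flatMap (fun s => [s, e ++ s]) := by
      show t.foldl _ ([[]] ++ [[]].map (fun r => r ++ e)) = _
      rw [ih]
      simp [allCombos_alt]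
    rw [hB, List.flatMap_assoc]
    congr 1
    funext s
    simp [List.append_assoc]

-- the two ports agree on every input
theorem pvFinal (lst : List (List Int)) : allCombos lst = allCombos_alt lst := by
  rw [pvA_eq]
  induction lst with
  | nil => simp [allCombos_alt, pvCombo]
  | cons e t ih =>
    rw [pvSpecA_cons, ih]
    show _ = t.foldl _ ([[]] ++ [[]].map (fun r => r ++ e))
    rw [pvMix]
    simp [List.flatMap_def]

-- ===== VERDICT (by name: the statement is the Claim_ definition above) =====
theorem allCombos_spec : Claim_equal_allCombos := fun lst _ => pvFinal lst
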